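-- pv_equiv track=rewrite | github.com/fmueller/scribae | src/scribae/refine.py | _sanitize_section
-- ===== SOURCE A (Python) =====
-- def _sanitize_section(body: str) -> str:
--     text = body.strip()
--     lines = text.splitlines()
--     cleaned_lines: list[str] = []
--     heading_dropped = False
--     for line in lines:
--         stripped = line.strip()
--         if stripped.startswith("#") and not heading_dropped:
--             heading_dropped = True
--             stripped = stripped.lstrip("#").strip()
--             if not stripped:
--                 continue
--         cleaned_lines.append(stripped)
--     cleaned = "\n".join(cleaned_lines).strip()
--     return cleaned or "(no content generated)"
-- ===== SOURCE B (Python) =====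
-- def _patch_heading(lines):
--     """Drop or replace the first '#'-heading line in a list of stripped lines."""
--     idx = next((i for i, line in enumerate(lines) if line.startswith("#")), None)
--     if idx is not None:
--         heading = lines[idx].lstrip("#").strip()
--         if heading:
--             lines[idx] = heading
--         else:
--             del lines[idx]
--     return lines
--
--
-- def _sanitize_section(body: str) -> str:
--     lines = _patch_heading([line.strip() for line in body.strip().splitlines()])
--     return "\n".join(lines).strip() or "(no content generated)"
-- ===== Notes on version B (the rewrite author's own statement) =====
-- stated objective: simpler
-- what changed: Replaces A's single stateful pass (a heading_dropped flag threaded through the loop) with a build-then-patch decomposition: strip all lines first, locate the first heading line by index search, then replace or delete just that one line.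
import Mathlib
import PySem

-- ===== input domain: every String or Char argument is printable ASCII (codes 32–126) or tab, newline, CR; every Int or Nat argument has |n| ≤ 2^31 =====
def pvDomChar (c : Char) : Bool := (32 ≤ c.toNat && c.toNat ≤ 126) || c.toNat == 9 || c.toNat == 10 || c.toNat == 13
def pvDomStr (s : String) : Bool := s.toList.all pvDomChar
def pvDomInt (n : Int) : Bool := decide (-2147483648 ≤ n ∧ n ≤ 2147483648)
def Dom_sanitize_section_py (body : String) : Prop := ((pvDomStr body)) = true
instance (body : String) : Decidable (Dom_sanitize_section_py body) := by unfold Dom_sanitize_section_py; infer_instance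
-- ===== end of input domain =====

-- B replaces A's stateful one-pass loop with a simpler build-then-patch decomposition:
-- strip all lines, locate the first heading line, patch or delete just that one (objective: simpler).

-- s.lstrip("#").strip(): lstrip("#") drops leading '#' characters — ported by hand
-- (dropWhile (· == '#')), exact for a single-character strip set; used by both sources.
def pvStripHash (s : String) : String :=
  PySem.Str.strip (String.ofList (s.toList.dropWhile (· == '#')))

-- ===== PORT A =====
def sanitize_section_py (body : String) : String :=
  let text := PySem.Str.strip body
  let lines := PySem.Str.splitlines text
  let res := lines.foldl (fun (st : List String × Bool) line =>
      let stripped := PySem.Str.strip line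
      if PySem.Str.startswith stripped "#" && !st.2 then
        let stripped := pvStripHash stripped
        if stripped == "" then (st.1, true) else (st.1 ++ [stripped], true)
      else (st.1 ++ [stripped], st.2)) ([], false)
  let cleaned := PySem.Str.strip (PySem.Str.join "\n" res.1)
  if cleaned == "" then "(no content generated)" else cleaned

-- ===== PORT B =====
-- next((i for i, line in enumerate(lines) if line.startswith("#")), None) is ported
-- as List.findIdx?; lines[idx] / lines[idx] = h / del lines[idx] as getElem? / set / eraseIdx.
def pvPatchHeading (lines : List String) : List String :=
  match lines.findIdx? (fun l => PySem.Str.startswith l "#") with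
  | none => lines
  | some i =>
    let heading := pvStripHash ((lines[i]?).getD "")
    if heading == "" then lines.eraseIdx i else lines.set i heading

def sanitize_section_py_alt (body : String) : String :=
  let lines := pvPatchHeading ((PySem.Str.splitlines (PySem.Str.strip body)).map PySem.Str.strip)
  let cleaned := PySem.Str.strip (PySem.Str.join "\n" lines)
  if cleaned == "" then "(no content generated)" else cleaned

-- ===== PRECONDITION & SPEC =====
def Spec_sanitize_section_py (body : String) (out : String) : Prop := out = sanitize_section_py_alt body
instance (body : String) (out : String) : Decidable (Spec_sanitize_section_py body out) := by unfold Spec_sanitize_section_py; infer_instance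

-- ===== CLAIM (what is proved, stated in full; the proofs are below) =====
def Claim_equal_sanitize_section_py : Prop := ∀ (body : String), Dom_sanitize_section_py body → Spec_sanitize_section_py body (sanitize_section_py body)

-- ===== LEMMAS AND PROOFS =====

def pvStep (st : List String × Bool) (m : String) : List String × Bool :=
  if PySem.Str.startswith m "#" && !st.2 then
    let s := pvStripHash m
    if s == "" then (st.1, true) else (st.1 ++ [s], true)
  else (st.1 ++ [m], st.2)

theorem pvFoldl_true (ms : List String) (acc : List String) :
    ms.foldl pvStep (acc, true) = (acc ++ ms, true) := by
  induction ms generalizing acc with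
  | nil => simp
  | cons m t ih =>
    have hstep : pvStep (acc, true) m = (acc ++ [m], true) := by
      simp [pvStep]
    rw [List.foldl_cons, hstep, ih]
    simp

theorem pvFoldl_false (ms : List String) (acc : List String) :
    (ms.foldl pvStep (acc, false)).1 = acc ++ pvPatchHeading ms := by
  induction ms generalizing acc with
  | nil => simp [pvPatchHeading]
  | cons m t ih =>
    by_cases hp : PySem.Str.startswith m "#" = true
    · have hfind : (m :: t).findIdx? (fun l => PySem.Str.startswith l "#") = some 0 := by
        rw [List.findIdx?_cons, if_pos hp]
      by_cases hh : pvStripHash m = ""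
      · have hstep : pvStep (acc, false) m = (acc, true) := by
          simp only [pvStep, hp, Bool.not_false, Bool.and_true, if_pos, hh, BEq.rfl]
        rw [List.foldl_cons, hstep, pvFoldl_true]
        unfold pvPatchHeading
        rw [hfind]
        simp [hh]
      · have hstep : pvStep (acc, false) m = (acc ++ [pvStripHash m], true) := by
          simp only [pvStep, hp, Bool.not_false, Bool.and_true, if_pos]
          rw [if_neg (by simpa using hh)]
        rw [List.foldl_cons, hstep, pvFoldl_true]
        unfold pvPatchHeading
        rw [hfind]
        simp [hh]
    · have hp' : PySem.Str.startswith m "#" = false := by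
        simpa using hp
      have hstep : pvStep (acc, false) m = (acc ++ [m], false) := by
        simp only [pvStep, hp', Bool.false_and, Bool.false_eq_true, if_neg,
          not_false_eq_true]
      have hpatch : pvPatchHeading (m :: t) = m :: pvPatchHeading t := by
        unfold pvPatchHeading
        rw [List.findIdx?_cons]
        simp only [hp']
        cases hfi : t.findIdx? (fun l => PySem.Str.startswith l "#") with
        | none => rfl
        | some i =>
          simp only [Option.map_some]
          rw [show (if false = true then some 0 else some (i + 1)) = some (i + 1) from rfl]
          simp only [List.getElem?_cons_succ, List.eraseIdx_cons_succ, List.set_cons_succ]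
          rw [← apply_ite (fun l => m :: l)]
      rw [List.foldl_cons, hstep, ih, hpatch]
      simp

def pvFinish (ls : List String) : String :=
  let cleaned := PySem.Str.strip (PySem.Str.join "\n" ls)
  if cleaned == "" then "(no content generated)" else cleaned

theorem sanitize_section_py_eq (body : String) :
    sanitize_section_py body = sanitize_section_py_alt body := by
  have e1 : List.foldl pvStep ([], false)
        ((PySem.Str.splitlines (PySem.Str.strip body)).map PySem.Str.strip)
      = List.foldl (fun (st : List String × Bool) line => pvStep st (PySem.Str.strip line))
        ([], false) (PySem.Str.splitlines (PySem.Str.strip body)) := List.foldl_map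
  have h : ((PySem.Str.splitlines (PySem.Str.strip body)).foldl
        (fun (st : List String × Bool) line =>
          let stripped := PySem.Str.strip line
          if PySem.Str.startswith stripped "#" && !st.2 then
            let stripped := pvStripHash stripped
            if stripped == "" then (st.1, true) else (st.1 ++ [stripped], true)
          else (st.1 ++ [stripped], st.2)) ([], false)).1
      = pvPatchHeading ((PySem.Str.splitlines (PySem.Str.strip body)).map PySem.Str.strip) :=
    (congrArg Prod.fst e1).symm.trans
      ((pvFoldl_false _ []).trans (List.nil_append _))
  have a1 : sanitize_section_py body
      = pvFinish ((PySem.Str.splitlines (PySem.Str.strip body)).foldl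
        (fun (st : List String × Bool) line =>
          let stripped := PySem.Str.strip line
          if PySem.Str.startswith stripped "#" && !st.2 then
            let stripped := pvStripHash stripped
            if stripped == "" then (st.1, true) else (st.1 ++ [stripped], true)
          else (st.1 ++ [stripped], st.2)) ([], false)).1 := rfl
  have a2 : pvFinish (pvPatchHeading
      ((PySem.Str.splitlines (PySem.Str.strip body)).map PySem.Str.strip))
      = sanitize_section_py_alt body := rfl
  exact a1.trans ((congrArg pvFinish h).trans a2)

-- ===== VERDICT (by name: the statement is the Claim_ definition above) =====
theorem sanitize_section_py_spec : Claim_equal_sanitize_section_py := by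
  intro body _
  unfold Spec_sanitize_section_py
  exact sanitize_section_py_eq body
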